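-- pv_equiv track=rewrite | github.com/jemmyfebryan/orin-ai-crm | src/orin_ai_crm/core/agents/nodes/profiling_nodes.py | is_valid_person_name
-- ===== SOURCE A (Python) =====
-- from typing import Literal, Optional
--
-- NON_NAME_PATTERNS = [
--     "~", "-", "_", ".", "...", "#", "user", "guest", "unknown", "anonymous",
--     "pt", "cv", "ud", "pd", "fakultas", "universitas", "institut",
--     "toko", "store", "shop", "mart", "jaya", "maj", "trading", "corp",
--     "corporation", "company", "ltd", "inc", "tbk", "persero"
-- ]
--
-- def is_valid_person_name(contact_name: Optional[str]) -> bool: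
--     """
--     Check if contact_name is a valid person's name (Indonesian or Western).
--
--     Returns True if contact_name looks like a real person's name.
--     Returns False if it looks like a company name, placeholder, or non-name string.
--
--     Examples:
--     - "Budi", "Siti", "Made", "John", "Sarah" -> True
--     - "PT Astra Jaya", "CV Maju", "~", "-" -> False
--     """
--     if not contact_name:
--         return False
--
--     name = contact_name.strip()
--
--     # Empty or very short
--     if len(name) < 2:
--         return False
--
--     # Check for non-name patterns
--     name_lower = name.lower()
--
--     # Direct matches with non-name patterns
--     if name_lower in NON_NAME_PATTERNS:
--         return False
--
--     # Contains company indicators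
--     for pattern in NON_NAME_PATTERNS:
--         if pattern in name_lower:
--             return False
--
--     # Single character or special character only
--     if len(name) <= 2 and any(c in name for c in "~-_#"):
--         return False
--
--     # All numbers or mostly special characters
--     if any(c.isdigit() for c in name):
--         # Contains numbers, likely not a name
--         return False
--
--     # Use LLM for more sophisticated validation if needed
--     # For common Indonesian/Western names, this should work well
--     return True
-- ===== SOURCE B (Python) =====
-- WORD_PATTERNS = (
--     "user", "guest", "unknown", "anonymous",
--     "pt", "cv", "ud", "pd", "fakultas", "universitas", "institut",
--     "toko", "store", "shop", "mart", "jaya", "maj", "trading", "corp",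
--     "corporation", "company", "ltd", "inc", "tbk", "persero",
-- )
--
-- # word patterns grouped by their first character, for O(1) candidate lookup per position
-- _WORDS_BY_FIRST = {}
-- for _w in WORD_PATTERNS:
--     _WORDS_BY_FIRST.setdefault(_w[0], []).append(_w)
--
-- def is_valid_person_name(contact_name):
--     if not contact_name:
--         return False
--     low = contact_name.strip().lower()
--     if len(low) < 2:
--         return False
--     for i, ch in enumerate(low):
--         if ch in "~-_.#" or ch.isdigit():
--             return False
--         for w in _WORDS_BY_FIRST.get(ch, ()):
--             if low.startswith(w, i):
--                 return False
--     return True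
-- ===== Notes on version B (the rewrite author's own statement) =====
-- stated objective: alternative
-- what changed: B replaces A's four overlapping rejection passes (direct list membership, a per-pattern substring loop, a short-special-char check and a separate digit scan) by a single left-to-right scan over the suffixes of the lowered name that rejects at the first position starting a forbidden character or a word pattern.
import Mathlib
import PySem

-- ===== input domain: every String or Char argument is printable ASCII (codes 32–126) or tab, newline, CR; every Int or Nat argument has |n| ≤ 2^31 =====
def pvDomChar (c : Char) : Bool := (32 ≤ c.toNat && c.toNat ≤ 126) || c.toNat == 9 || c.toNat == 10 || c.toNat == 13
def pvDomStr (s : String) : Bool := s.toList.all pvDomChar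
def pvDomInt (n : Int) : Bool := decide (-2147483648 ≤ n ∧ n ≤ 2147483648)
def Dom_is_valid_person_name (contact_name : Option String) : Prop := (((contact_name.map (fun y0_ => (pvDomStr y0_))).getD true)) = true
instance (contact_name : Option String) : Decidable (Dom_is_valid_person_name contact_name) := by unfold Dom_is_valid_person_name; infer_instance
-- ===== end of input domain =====

-- B replaces A's four overlapping rejection passes (direct match, per-pattern substring loop,
-- short-special-char check, digit scan) by one left-to-right scan over the suffixes of the
-- lowered name, rejecting at the first position that starts a bad character or a word pattern.

-- ===== PORT A =====
def NON_NAME_PATTERNS : List String := [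
  "~", "-", "_", ".", "...", "#", "user", "guest", "unknown", "anonymous",
  "pt", "cv", "ud", "pd", "fakultas", "universitas", "institut",
  "toko", "store", "shop", "mart", "jaya", "maj", "trading", "corp",
  "corporation", "company", "ltd", "inc", "tbk", "persero"]

def is_valid_person_name (contact_name : Option String) : Bool :=
  match contact_name with
  | none => false                                     -- `if not contact_name` (None is falsy)
  | some cn =>
    if cn.toList.isEmpty then false                   -- `if not contact_name` ("" is falsy)
    else
      let name := PySem.Chars.strip cn.toList
      if name.length < 2 then false
      else
        let name_lower := PySem.Chars.lower name
        -- `if name_lower in NON_NAME_PATTERNS`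
        if NON_NAME_PATTERNS.any (fun p => name_lower == p.toList) then false
        -- `for pattern in NON_NAME_PATTERNS: if pattern in name_lower: return False`
        else if NON_NAME_PATTERNS.any (fun p => PySem.Chars.isIn p.toList name_lower) then false
        -- `if len(name) <= 2 and any(c in name for c in "~-_#")`
        else if name.length ≤ 2 && "~-_#".toList.any (fun c => PySem.Chars.isIn [c] name) then false
        -- `if any(c.isdigit() for c in name)`
        else if name.any (fun c => PySem.Chars.strIsdigit [c]) then false
        else true

-- ===== PORT B =====
def WORD_PATTERNS : List String := [
  "user", "guest", "unknown", "anonymous",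
  "pt", "cv", "ud", "pd", "fakultas", "universitas", "institut",
  "toko", "store", "shop", "mart", "jaya", "maj", "trading", "corp",
  "corporation", "company", "ltd", "inc", "tbk", "persero"]

-- Source B's `for i, ch in enumerate(low)` loop, as structural recursion over the suffix low[i:];
-- `_WORDS_BY_FIRST.get(ch, ())` (the dict grouping the words by first character) is ported as
-- the filter of WORD_PATTERNS by first character, which lists the same words in the same order;
-- `low.startswith(w, i)` is `PySem.Chars.startswith` of the suffix low[i:] = c :: rest.
def bScan : List Char → Bool
  | [] => true
  | c :: rest =>
    if PySem.Chars.isIn [c] "~-_.#".toList || PySem.Chars.strIsdigit [c] then false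
    else if (WORD_PATTERNS.filter (fun w => w.toList.head? == some c)).any
        (fun w => PySem.Chars.startswith (c :: rest) w.toList) then false
    else bScan rest

def is_valid_person_name_alt (contact_name : Option String) : Bool :=
  match contact_name with
  | none => false
  | some cn =>
    if cn.toList.isEmpty then false
    else
      let low := PySem.Chars.lower (PySem.Chars.strip cn.toList)
      if low.length < 2 then false
      else bScan low

-- ===== PRECONDITION & SPEC =====
def Spec_is_valid_person_name (contact_name : Option String) (out : Bool) : Prop := out = is_valid_person_name_alt contact_name
instance (contact_name : Option String) (out : Bool) : Decidable (Spec_is_valid_person_name contact_name out) := by unfold Spec_is_valid_person_name; infer_instance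

-- ===== CLAIM (what is proved, stated in full; the proofs are below) =====
def Claim_equal_is_valid_person_name : Prop := ∀ (contact_name : Option String), Dom_is_valid_person_name contact_name → Spec_is_valid_person_name contact_name (is_valid_person_name contact_name)

-- ===== LEMMAS AND PROOFS =====

-- singleton infix is membership
lemma singleton_infix_iff (c : Char) (l : List Char) : [c] <:+: l ↔ c ∈ l := by
  induction l with
  | nil => simp
  | cons a t ih => simp [List.infix_cons_iff, ih, List.cons_prefix_cons]

lemma isIn_singleton_iff (c : Char) (l : List Char) :
    PySem.Chars.isIn [c] l = true ↔ c ∈ l := by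
  rw [PySem.Chars.isIn_iff_infix, singleton_infix_iff]

lemma strIsdigit_singleton (c : Char) :
    PySem.Chars.strIsdigit [c] = PySem.Chars.isdigit c := by
  simp [PySem.Chars.strIsdigit]

-- lowering does not create or destroy digits
lemma isdigit_lowerChar (c : Char) :
    PySem.Chars.isdigit (PySem.Chars.lowerChar c) = PySem.Chars.isdigit c := by
  by_cases h : PySem.Chars.isupper c = true
  · have h' := h
    rw [PySem.Chars.isupper, Bool.and_eq_true, decide_eq_true_eq, decide_eq_true_eq] at h'
    have h65 : 65 ≤ c.toNat := h'.1
    have h90 : c.toNat ≤ 90 := h'.2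
    have hv : (Char.ofNat (c.toNat + 32)).toNat = c.toNat + 32 := by
      rw [Char.toNat_ofNat, if_pos]; left; omega
    have h9 : ('9').toNat = 57 := by decide
    have e1 : PySem.Chars.isdigit (Char.ofNat (c.toNat + 32)) = false := by
      simp only [PySem.Chars.isdigit, Bool.and_eq_false_iff, decide_eq_false_iff_not]
      right; intro hle
      have h2 : (Char.ofNat (c.toNat + 32)).toNat ≤ ('9').toNat := Char.le_def.mp hle
      rw [hv, h9] at h2; omega
    have e2 : PySem.Chars.isdigit c = false := by
      simp only [PySem.Chars.isdigit, Bool.and_eq_false_iff, decide_eq_false_iff_not]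
      right; intro hle
      have h2 : c.toNat ≤ ('9').toNat := Char.le_def.mp hle
      rw [h9] at h2; omega
    simp [PySem.Chars.lowerChar, h, e1, e2]
  · simp [PySem.Chars.lowerChar, h]

lemma word_toList_ne_nil : ∀ w ∈ WORD_PATTERNS, w.toList ≠ [] := by
  intro w hw; fin_cases hw <;> simp

-- characterization of B's scan
lemma bScan_eq_true_iff (l : List Char) : bScan l = true ↔
    (∀ c ∈ l, ¬(c ∈ "~-_.#".toList ∨ PySem.Chars.isdigit c = true)) ∧
    (∀ w ∈ WORD_PATTERNS, ¬ (w.toList <:+: l)) := by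
  induction l with
  | nil =>
    simp only [bScan, List.not_mem_nil, false_implies, implies_true, true_and]
    constructor
    · intro _ w hw hinf
      exact word_toList_ne_nil w hw (List.eq_nil_of_infix_nil hinf)
    · intro _; trivial
  | cons c rest ih =>
    simp only [bScan]
    by_cases h1 : (PySem.Chars.isIn [c] "~-_.#".toList || PySem.Chars.strIsdigit [c]) = true
    · rw [if_pos h1]
      simp only [Bool.or_eq_true, isIn_singleton_iff, strIsdigit_singleton] at h1
      constructor
      · intro h; exact absurd h (by simp)
      · rintro ⟨hchars, -⟩
        exact absurd h1 (hchars c (List.mem_cons_self))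
    · rw [if_neg h1]
      simp only [Bool.or_eq_true, isIn_singleton_iff, strIsdigit_singleton, not_or] at h1
      push_neg at h1
      by_cases h2 : ((WORD_PATTERNS.filter (fun w => w.toList.head? == some c)).any
          (fun w => PySem.Chars.startswith (c :: rest) w.toList)) = true
      · rw [if_pos h2]
        simp only [List.any_eq_true, List.mem_filter, PySem.Chars.startswith_iff] at h2
        obtain ⟨w, ⟨hw, -⟩, hpre⟩ := h2
        constructor
        · intro h; exact absurd h (by simp)
        · rintro ⟨-, hwords⟩
          exact absurd (hpre.isInfix) (hwords w hw)
      · rw [if_neg h2]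
        simp only [List.any_eq_true, List.mem_filter, PySem.Chars.startswith_iff,
          not_exists, not_and] at h2
        have h2' : ∀ w ∈ WORD_PATTERNS, ¬ w.toList <+: c :: rest := by
          intro w hw hpre
          cases hlist : w.toList with
          | nil => exact word_toList_ne_nil w hw hlist
          | cons a t =>
            rw [hlist] at hpre
            have ha : a = c := (List.cons_prefix_cons.mp hpre).1
            refine h2 w ⟨hw, ?_⟩ ?_
            · rw [hlist, ha]; simp
            · rw [hlist]; exact hpre
        clear h2
        rw [ih]
        constructor
        · rintro ⟨hchars, hwords⟩
          refine ⟨?_, ?_⟩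
          · intro d hd
            rcases List.mem_cons.mp hd with rfl | hd
            · simpa using h1
            · exact hchars d hd
          · intro w hw hinf
            rcases List.infix_cons_iff.mp hinf with hpre | hinf'
            · exact h2' w hw hpre
            · exact hwords w hw hinf'
        · rintro ⟨hchars, hwords⟩
          refine ⟨fun d hd => hchars d (List.mem_cons_of_mem _ hd),
                  fun w hw hinf => hwords w hw (List.infix_cons_iff.mpr (Or.inr hinf))⟩

-- any NON_NAME pattern occurring in l makes B's scan reject l
lemma bScan_false_of_pattern {p : String} {l : List Char}
    (hp : p ∈ NON_NAME_PATTERNS) (hinf : p.toList <:+: l) : bScan l = false := by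
  have hsplit : ∀ q ∈ NON_NAME_PATTERNS,
      (∃ c ∈ "~-_.#".toList, q.toList = [c]) ∨ q = "..." ∨ q ∈ WORD_PATTERNS := by
    intro q hq; fin_cases hq <;> simp [WORD_PATTERNS]
  rw [← Bool.not_eq_true, bScan_eq_true_iff]
  rintro ⟨hchars, hwords⟩
  rcases hsplit p hp with ⟨c, hc, hq⟩ | rfl | hw
  · rw [hq, singleton_infix_iff] at hinf
    exact hchars c hinf (Or.inl hc)
  · have hdot : '.' ∈ l := hinf.subset (by decide)
    exact hchars '.' hdot (Or.inl (by decide))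
  · exact hwords p hw hinf

-- ===== VERDICT (by name: the statement is the Claim_ definition above) =====
theorem is_valid_person_name_spec : Claim_equal_is_valid_person_name := by
  intro contact_name _
  unfold Spec_is_valid_person_name
  cases contact_name with
  | none => rfl
  | some cn =>
    simp only [is_valid_person_name, is_valid_person_name_alt]
    by_cases h0 : cn.toList.isEmpty
    · simp [h0]
    · rw [if_neg h0, if_neg h0]
      set name := PySem.Chars.strip cn.toList with hname
      set low := PySem.Chars.lower name with hlow
      have hlen : low.length = name.length := by
        simp [hlow, PySem.Chars.lower]
      by_cases h1 : name.length < 2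
      · rw [if_pos h1, if_pos (by omega : low.length < 2)]
      · rw [if_neg h1, if_neg (by omega : ¬ low.length < 2)]
        -- membership-in-low helper: a char of name lands in low as its lowering
        have hmem_low : ∀ c ∈ name, PySem.Chars.lowerChar c ∈ low := by
          intro c hc
          rw [hlow]
          exact List.mem_map_of_mem hc
        by_cases hd : (NON_NAME_PATTERNS.any fun p => low == p.toList) = true
        · rw [if_pos hd]
          simp only [List.any_eq_true, beq_iff_eq] at hd
          obtain ⟨p, hp, heq⟩ := hd
          exact (bScan_false_of_pattern hp (heq ▸ List.infix_refl _)).symm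
        · rw [if_neg hd]
          by_cases hs : (NON_NAME_PATTERNS.any fun p => PySem.Chars.isIn p.toList low) = true
          · rw [if_pos hs]
            simp only [List.any_eq_true, PySem.Chars.isIn_iff_infix] at hs
            obtain ⟨p, hp, hinf⟩ := hs
            exact (bScan_false_of_pattern hp hinf).symm
          · rw [if_neg hs]
            simp only [List.any_eq_true, PySem.Chars.isIn_iff_infix, not_exists, not_and] at hs
            by_cases hsp : (name.length ≤ 2 && "~-_#".toList.any fun c => PySem.Chars.isIn [c] name) = true
            · rw [if_pos hsp]
              simp only [Bool.and_eq_true, List.any_eq_true, isIn_singleton_iff] at hsp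
              obtain ⟨-, c, hc4, hcmem⟩ := hsp
              rw [(by decide : "~-_#".toList = ['~', '-', '_', '#'])] at hc4
              have hfix : PySem.Chars.lowerChar c = c := by
                fin_cases hc4 <;> decide
              have hclow : c ∈ low := hfix ▸ hmem_low c hcmem
              have hcpat : ∃ p ∈ NON_NAME_PATTERNS, p.toList = [c] := by
                have key : ∀ d ∈ (['~', '-', '_', '#'] : List Char),
                    ∃ p ∈ NON_NAME_PATTERNS, p.toList = [d] := by
                  intro d hd; fin_cases hd <;> simp [NON_NAME_PATTERNS]
                exact key c hc4
              obtain ⟨p, hp, hpeq⟩ := hcpat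
              exact (bScan_false_of_pattern hp (hpeq ▸ (singleton_infix_iff c low).mpr hclow)).symm
            · rw [if_neg hsp]
              by_cases hdig : (name.any fun c => PySem.Chars.strIsdigit [c]) = true
              · rw [if_pos hdig]
                simp only [List.any_eq_true, strIsdigit_singleton] at hdig
                obtain ⟨c, hc, hcd⟩ := hdig
                symm; rw [← Bool.not_eq_true, bScan_eq_true_iff]
                rintro ⟨hchars, -⟩
                exact hchars _ (hmem_low c hc) (Or.inr ((isdigit_lowerChar c).trans hcd))
              · rw [if_neg hdig]
                symm
                rw [bScan_eq_true_iff]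
                simp only [List.any_eq_true, strIsdigit_singleton, not_exists, not_and] at hdig
                push_neg at hdig
                refine ⟨?_, ?_⟩
                · intro d hdl
                  obtain ⟨c, hc, rfl⟩ := List.mem_map.mp (hlow ▸ hdl)
                  rintro (hspec | hdd)
                  · -- a special char in low means a single-char pattern occurs in low
                    have : ∃ p ∈ NON_NAME_PATTERNS, p.toList = [PySem.Chars.lowerChar c] := by
                      rw [(by decide : "~-_.#".toList = ['~', '-', '_', '.', '#'])] at hspec
                      have key : ∀ d ∈ (['~', '-', '_', '.', '#'] : List Char),
                          ∃ p ∈ NON_NAME_PATTERNS, p.toList = [d] := by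
                        intro d hd; fin_cases hd <;> simp [NON_NAME_PATTERNS]
                      exact key _ hspec
                    obtain ⟨p, hp, hpeq⟩ := this
                    exact hs p hp (hpeq ▸ (singleton_infix_iff _ low).mpr hdl)
                  · rw [isdigit_lowerChar] at hdd
                    exact absurd hdd (by simpa using hdig c hc)
                · intro w hw
                  have hw' : w ∈ NON_NAME_PATTERNS := by
                    have key : ∀ v ∈ WORD_PATTERNS, v ∈ NON_NAME_PATTERNS := by
                      intro v hv; fin_cases hv <;> simp [NON_NAME_PATTERNS]
                    exact key w hw
                  exact hs w hw'
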